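-- pv_equiv track=rewrite | github.com/Casper-Guo/AoC-Language-Exploration | 2023.py/day14.py | let_roll
-- ===== SOURCE A (Python) =====
-- def let_roll(line: list[str]) -> list[str]:
--     """Let rocks roll all the way to the left."""
--     for initial, i in enumerate(line):
--         if i == "O":
--             for final in range(initial - 1, -1, -1):
--                 if line[final] != '.':
--                     line[initial] = "."
--                     line[final + 1] = "O"
--                     break
--             else:
--                 line[initial] = "."
--                 line[0] = "O"
--
--     return line
-- ===== SOURCE B (Python) =====
-- def let_roll(line: list[str]) -> list[str]:
--     """Let rocks roll all the way to the left (single pass, next-free-slot pointer)."""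
--     free = 0
--     for i, c in enumerate(line):
--         if c == "O":
--             line[i] = "."
--             line[free] = "O"
--             free += 1
--         elif c != ".":
--             free = i + 1
--     return line
-- ===== Notes on version B (the rewrite author's own statement) =====
-- stated objective: alternative
-- what changed: Replaced A's per-rock backwards rescan of the prefix with a single left-to-right pass that tracks the next free slot and resets it after each non-'.'/non-'O' blocker.
import Mathlib
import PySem

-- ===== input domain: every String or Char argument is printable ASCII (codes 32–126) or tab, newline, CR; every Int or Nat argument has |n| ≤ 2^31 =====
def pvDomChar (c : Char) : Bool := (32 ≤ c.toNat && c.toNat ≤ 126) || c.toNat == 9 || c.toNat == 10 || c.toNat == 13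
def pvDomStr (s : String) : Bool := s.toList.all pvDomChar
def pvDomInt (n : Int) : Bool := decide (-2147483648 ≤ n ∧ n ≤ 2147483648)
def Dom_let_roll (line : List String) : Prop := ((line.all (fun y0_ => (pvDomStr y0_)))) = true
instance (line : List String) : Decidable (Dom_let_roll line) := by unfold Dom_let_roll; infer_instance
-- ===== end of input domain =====

-- B replaces A's per-rock backwards rescan by a single left-to-right pass with a
-- next-free-slot pointer; equivalence is about the returned list (both mutate `line` in place
-- in Python, ending with identical contents).

-- ===== PORT A =====
-- inner `for final in range(initial-1,-1,-1): …` with its for-else; fuel f is final+1,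
-- so case f+1 reads line[f] (always in range when called from the outer loop, hence getD is exact).
def pvScanA (acc : List String) (initial : Nat) : Nat → List String
  | 0 => (acc.set initial ".").set 0 "O"
  | f + 1 =>
      if acc.getD f "" ≠ "." then (acc.set initial ".").set (f + 1) "O"
      else pvScanA acc initial f

-- outer `for initial, i in enumerate(line)`: earlier iterations only write at indices ≤ their own
-- position, so the element Python's enumerate yields at index `initial` is the original one; we
-- walk the original list carrying the mutated list `acc` and the index.
def pvRollA : List String → List String → Nat → List String
  | acc, [], _ => acc
  | acc, c :: rest, i => pvRollA (if c = "O" then pvScanA acc i i else acc) rest (i + 1)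

def let_roll (line : List String) : List String := pvRollA line line 0

-- ===== PORT B =====
def pvRollB : List String → Nat → Nat → List String → List String
  | acc, _, _, [] => acc
  | acc, i, free, c :: rest =>
      if c = "O" then pvRollB ((acc.set i ".").set free "O") (i + 1) (free + 1) rest
      else if c ≠ "." then pvRollB acc (i + 1) (i + 1) rest
      else pvRollB acc (i + 1) free rest

def let_roll_alt (line : List String) : List String := pvRollB line 0 0 line

-- ===== PRECONDITION & SPEC =====
def Spec_let_roll (line : List String) (out : List String) : Prop := out = let_roll_alt line
instance (line : List String) (out : List String) : Decidable (Spec_let_roll line out) := by unfold Spec_let_roll; infer_instance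

-- ===== CLAIM (what is proved, stated in full; the proofs are below) =====
def Claim_equal_let_roll : Prop := ∀ (line : List String), Dom_let_roll line → Spec_let_roll line (let_roll line)

-- ===== LEMMAS AND PROOFS =====

-- A's backwards scan, run over a stretch of dots ending at the blocker at free-1 (or at the left
-- wall when free = 0), places the rock exactly where B's pointer says.
theorem pvScanA_eq (acc : List String) (i free : Nat)
    (hdots : ∀ j, free ≤ j → j < i → acc.getD j "" = ".")
    (hblk : free = 0 ∨ acc.getD (free - 1) "" ≠ ".") :
    ∀ f, free ≤ f → f ≤ i → pvScanA acc i f = (acc.set i ".").set free "O" := by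
  intro f
  induction f with
  | zero =>
      intro h0 _
      have : free = 0 := Nat.le_zero.mp h0
      simp [pvScanA, this]
  | succ f ih =>
      intro hf hfi
      rw [pvScanA]
      by_cases hfree : free = f + 1
      · have hne : acc.getD f "" ≠ "." := by
          rcases hblk with h | h
          · omega
          · simpa [hfree] using h
        rw [if_pos hne, hfree]
      · have hle : free ≤ f := by omega
        rw [if_neg (not_not.mpr (hdots f hle (by omega)))]
        exact ih hle (by omega)

theorem pvRoll_eq (rest : List String) : ∀ (pre : List String) (free : Nat),
    free ≤ pre.length →
    (∀ j, free ≤ j → j < pre.length → pre.getD j "" = ".") →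
    (free = 0 ∨ pre.getD (free - 1) "" ≠ ".") →
    pvRollA (pre ++ rest) rest pre.length = pvRollB (pre ++ rest) pre.length free rest := by
  induction rest with
  | nil => intro pre free _ _ _; simp [pvRollA, pvRollB]
  | cons c rest ih =>
      intro pre free hle hdots hblk
      have hdots' : ∀ j, free ≤ j → j < pre.length → (pre ++ c :: rest).getD j "" = "." := by
        intro j h1 h2
        rw [List.getD_eq_getElem?_getD, List.getElem?_append_left h2,
          ← List.getD_eq_getElem?_getD]
        exact hdots j h1 h2
      have hblk' : free = 0 ∨ (pre ++ c :: rest).getD (free - 1) "" ≠ "." := by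
        rcases Nat.eq_zero_or_pos free with h0 | h0
        · exact Or.inl h0
        · rcases hblk with h | h
          · omega
          · right
            have hlt : free - 1 < pre.length := by omega
            rw [List.getD_eq_getElem?_getD, List.getElem?_append_left hlt,
              ← List.getD_eq_getElem?_getD]
            exact h
      by_cases hO : c = "O"
      · -- rock: A scans back, B places at free; both continue on the same updated list
        have hscan : pvScanA (pre ++ c :: rest) pre.length pre.length
            = ((pre ++ c :: rest).set pre.length ".").set free "O" :=
          pvScanA_eq _ _ _ hdots' hblk' pre.length hle le_rfl
        have hset1 : (pre ++ c :: rest).set pre.length "." = (pre ++ ["."]) ++ rest := by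
          rw [List.set_append_right _ _ le_rfl]
          simp
        have hset2 : ((pre ++ ["."]) ++ rest).set free "O"
            = ((pre ++ ["."]).set free "O") ++ rest := by
          rw [List.set_append_left]
          simp; omega
        have hkey : ((pre ++ c :: rest).set pre.length ".").set free "O"
            = ((pre ++ ["."]).set free "O") ++ rest := by rw [hset1, hset2]
        set pre' : List String := (pre ++ ["."]).set free "O" with hpre'
        have hlen' : pre'.length = pre.length + 1 := by simp [hpre']
        have hdots2 : ∀ j, free + 1 ≤ j → j < pre'.length → pre'.getD j "" = "." := by
          intro j h1 h2
          rw [hpre', List.getD_eq_getElem?_getD, List.getElem?_set_ne (by omega)]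
          by_cases hj : j < pre.length
          · rw [List.getElem?_append_left hj, ← List.getD_eq_getElem?_getD]
            exact hdots j (by omega) hj
          · have : j = pre.length := by simp [hpre'] at h2; omega
            simp [this]
        have hblk2 : free + 1 = 0 ∨ pre'.getD (free + 1 - 1) "" ≠ "." := by
          right
          have : pre'.getD free "" = "O" := by
            rw [hpre', List.getD_eq_getElem?_getD, List.getElem?_set_self (by simp; omega)]
            rfl
          simp only [Nat.add_sub_cancel]
          rw [this]; decide
        have := ih pre' (free + 1) (by omega) hdots2 hblk2
        simp only [pvRollA, pvRollB]
        rw [if_pos hO, if_pos hO, hscan, hkey, ← hlen']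
        exact this
      · by_cases hdot : c = "."
        · have hdots2 : ∀ j, free ≤ j → j < (pre ++ [c]).length → (pre ++ [c]).getD j "" = "." := by
            intro j h1 h2
            by_cases hj : j < pre.length
            · rw [List.getD_eq_getElem?_getD, List.getElem?_append_left hj,
                ← List.getD_eq_getElem?_getD]
              exact hdots j h1 hj
            · have : j = pre.length := by simp at h2; omega
              simp [this, hdot]
          have hblk2 : free = 0 ∨ (pre ++ [c]).getD (free - 1) "" ≠ "." := by
            rcases Nat.eq_zero_or_pos free with h0 | h0
            · exact Or.inl h0
            · rcases hblk with h | h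
              · omega
              · right
                have hlt : free - 1 < pre.length := by omega
                rw [List.getD_eq_getElem?_getD, List.getElem?_append_left hlt,
                  ← List.getD_eq_getElem?_getD]
                exact h
          have := ih (pre ++ [c]) free (by simp; omega) hdots2 hblk2
          simp only [List.append_assoc, List.cons_append, List.nil_append,
            List.length_append, List.length_cons, List.length_nil] at this
          simpa [hO, hdot, pvRollA, pvRollB] using this
        · -- blocker: pointer resets to i+1
          have hdots2 : ∀ j, pre.length + 1 ≤ j → j < (pre ++ [c]).length →
              (pre ++ [c]).getD j "" = "." := by
            intro j h1 h2; simp at h2; omega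
          have hblk2 : pre.length + 1 = 0 ∨ (pre ++ [c]).getD (pre.length + 1 - 1) "" ≠ "." := by
            right
            simp only [Nat.add_sub_cancel]
            rw [List.getD_eq_getElem?_getD, List.getElem?_append_right le_rfl]
            simpa using hdot
          have := ih (pre ++ [c]) (pre.length + 1) (by simp) hdots2 hblk2
          simp only [List.append_assoc, List.cons_append, List.nil_append,
            List.length_append, List.length_cons, List.length_nil] at this
          simpa [hO, hdot, pvRollA, pvRollB] using this

-- ===== VERDICT (by name: the statement is the Claim_ definition above) =====
theorem let_roll_spec : Claim_equal_let_roll := by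
  intro line _
  unfold Spec_let_roll let_roll let_roll_alt
  have := pvRoll_eq line [] 0 (by simp) (by intro j _ h; simp at h) (Or.inl rfl)
  simpa using this
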